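-- pv_equiv track=rewrite | github.com/Alexey-T/CudaText | app/py/cuda_sort/__init__.py | get_dups
-- ===== SOURCE A (Python) =====
-- def get_dups(lines, nocase):
--     l = list(lines)
--     res = []
--     while l:
--         s = l[0]
--         del l[0]
--         for i in reversed(range(len(l))):
--             if nocase:
--                 ok = s.lower()==l[i].lower()
--             else:
--                 ok = s==l[i]
--             if ok:
--                 if s not in res:
--                     res.append(s)
--                 del l[i]
--     return res
-- ===== SOURCE B (Python) =====
-- def get_dups(lines, nocase):
--     key = (lambda s: s.lower()) if nocase else (lambda s: s)
--     counts = {}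
--     for s in lines:
--         k = key(s)
--         counts[k] = counts.get(k, 0) + 1
--     res = []
--     seen = set()
--     for s in lines:
--         k = key(s)
--         if counts[k] > 1 and k not in seen:
--             seen.add(k)
--             res.append(s)
--     return res
-- ===== Notes on version B (the rewrite author's own statement) =====
-- stated objective: faster
-- what changed: Replaces A's destructive repeated scan-and-delete (take head, scan the rest backwards deleting matches) with a two-pass index: build a key->count dict once, then one forward pass with a seen set emitting each first occurrence of a duplicated key.
import Mathlib
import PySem

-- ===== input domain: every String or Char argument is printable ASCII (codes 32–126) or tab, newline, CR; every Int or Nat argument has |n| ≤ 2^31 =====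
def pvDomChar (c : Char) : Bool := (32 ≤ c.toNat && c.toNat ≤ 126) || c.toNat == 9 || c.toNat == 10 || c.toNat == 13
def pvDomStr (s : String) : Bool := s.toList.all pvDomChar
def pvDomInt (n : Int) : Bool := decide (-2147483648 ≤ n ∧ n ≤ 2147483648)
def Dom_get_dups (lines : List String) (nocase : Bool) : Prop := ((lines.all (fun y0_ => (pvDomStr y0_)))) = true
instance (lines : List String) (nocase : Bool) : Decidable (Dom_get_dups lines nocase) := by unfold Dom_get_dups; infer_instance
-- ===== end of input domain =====

-- B replaces A's destructive repeated scan-and-delete with a key-count dict built once plus a single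
-- seen-set pass (measurably faster on the generated inputs in a timing run).


-- ===== PORT A =====
-- inner loop 'for i in reversed(range(len(l))): …': l[i] is always in range (i < len(l) by
-- construction), ported as getD with an unused "" default; 'del l[i]' is eraseIdx.
def pvInnerA (nocase : Bool) (s : String) : Nat → List String → List String → List String × List String
  | 0, l, res => (l, res)
  | i+1, l, res =>
    if (if nocase then PySem.Str.lower s == PySem.Str.lower (l.getD i "") else s == l.getD i "") then
      pvInnerA nocase s i (l.eraseIdx i) (if res.contains s then res else res ++ [s])
    else
      pvInnerA nocase s i l res

-- needed by pvOuterA's termination: the inner loop never lengthens l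
theorem pvInnerA_len (nocase : Bool) (s : String) :
    ∀ (i : Nat) (l res : List String), (pvInnerA nocase s i l res).1.length ≤ l.length := by
  intro i
  induction i with
  | zero => intro l res; rfl
  | succ i ih =>
    intro l res
    rw [pvInnerA]
    by_cases hc : (if nocase then PySem.Str.lower s == PySem.Str.lower (l.getD i "") else s == l.getD i "") = true
    · rw [if_pos hc]
      exact le_trans (ih _ _) (List.length_eraseIdx_le l i)
    · rw [if_neg hc]
      exact ih _ _

-- 'while l: s = l[0]; del l[0]; <inner loop>'
def pvOuterA (nocase : Bool) (l res : List String) : List String :=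
  match l with
  | [] => res
  | s :: rest =>
    let p := pvInnerA nocase s rest.length rest res
    pvOuterA nocase p.1 p.2
termination_by l.length
decreasing_by
  exact Nat.lt_of_le_of_lt (pvInnerA_len nocase s rest.length rest res) (by simp)

def get_dups (lines : List String) (nocase : Bool) : List String :=
  pvOuterA nocase lines []

-- ===== PORT B =====
-- counts[k] in the second pass: k was inserted in the first pass (s ∈ lines), ported as getD 0.
def get_dups_alt (lines : List String) (nocase : Bool) : List String :=
  let key := fun s => if nocase then PySem.Str.lower s else s
  let counts := lines.foldl (fun d s => d.insert (key s) (d.getD (key s) 0 + 1))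
    (PySem.Dict.empty : PySem.Dict String Int)
  (lines.foldl
    (fun (st : PySem.Set String × List String) s =>
      if counts.getD (key s) 0 > 1 && !(PySem.Set.contains st.1 (key s)) then
        (PySem.Set.add st.1 (key s), st.2 ++ [s])
      else st)
    (PySem.Set.empty, [])).2

-- ===== PRECONDITION & SPEC =====
def Spec_get_dups (lines : List String) (nocase : Bool) (out : List String) : Prop := out = get_dups_alt lines nocase
instance (lines : List String) (nocase : Bool) (out : List String) : Decidable (Spec_get_dups lines nocase out) := by unfold Spec_get_dups; infer_instance

-- ===== CLAIM (what is proved, stated in full; the proofs are below) =====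
def Claim_equal_get_dups : Prop := ∀ (lines : List String) (nocase : Bool), Dom_get_dups lines nocase → Spec_get_dups lines nocase (get_dups lines nocase)

-- ===== LEMMAS AND PROOFS =====

-- the normalized comparison key both programs use
def pvKey (nocase : Bool) (s : String) : String := if nocase then PySem.Str.lower s else s

-- common specification: emit each first occurrence of a duplicated key, in input order
-- (fuel-indexed to keep the recursion structural; always used with l.length ≤ fuel)
def pvSpecF (k : String → String) : Nat → List String → List String
  | 0, _ => []
  | _+1, [] => []
  | n+1, s :: l =>
    (if l.any (fun t => k s == k t) then [s] else []) ++
      pvSpecF k n (l.filter (fun t => !(k s == k t)))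

theorem pv_ok_eq (nocase : Bool) (s t : String) :
    (if nocase then PySem.Str.lower s == PySem.Str.lower t else s == t) = (pvKey nocase s == pvKey nocase t) := by
  cases nocase <;> rfl

-- the inner loop, walked from index i-1 down to 0, filters the processed prefix and records one hit
theorem pv_inner_spec (nocase : Bool) (s : String) :
    ∀ (i : Nat) (l res : List String), i ≤ l.length →
      pvInnerA nocase s i l res =
        ((l.take i).filter (fun t => !(pvKey nocase s == pvKey nocase t)) ++ l.drop i,
         if (l.take i).any (fun t => pvKey nocase s == pvKey nocase t) then
           (if res.contains s then res else res ++ [s]) else res) := by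
  intro i
  induction i with
  | zero => intro l res _; simp [pvInnerA]
  | succ i ih =>
    intro l res h
    have hi : i < l.length := h
    rw [pvInnerA, pv_ok_eq, List.getD_eq_getElem l "" hi]
    have htake : l.take (i+1) = l.take i ++ [l[i]] := List.take_succ_eq_append_getElem hi
    by_cases hm : (pvKey nocase s == pvKey nocase l[i]) = true
    · rw [if_pos hm]
      rw [ih (l.eraseIdx i) _ (by rw [List.length_eraseIdx_of_lt hi]; omega)]
      rw [List.eraseIdx_eq_take_drop_succ l i,
          List.take_left' (by simp [Nat.le_of_lt hi]),
          List.drop_left' (by simp [Nat.le_of_lt hi])]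
      rw [htake]
      simp only [List.filter_append, List.any_append, List.filter_cons, List.any_cons, hm]
      by_cases hr : s ∈ res <;> simp [hr]
    · rw [if_neg hm]
      rw [ih l res (Nat.le_of_lt hi)]
      rw [htake]
      simp only [List.filter_append, List.any_append, List.filter_cons, List.any_cons, hm]
      rw [List.drop_eq_getElem_cons hi]
      simp

theorem pv_inner_full (nocase : Bool) (s : String) (l res : List String) :
    pvInnerA nocase s l.length l res =
      (l.filter (fun t => !(pvKey nocase s == pvKey nocase t)),
       if l.any (fun t => pvKey nocase s == pvKey nocase t) then
         (if res.contains s then res else res ++ [s]) else res) := by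
  simpa using pv_inner_spec nocase s l.length l res le_rfl

-- A's outer loop computes pvSpecF, provided res shares no key with the remaining lines
theorem pv_outer_spec (nocase : Bool) :
    ∀ (n : Nat) (l res : List String), l.length ≤ n →
      (∀ r ∈ res, ∀ t ∈ l, pvKey nocase r ≠ pvKey nocase t) →
      pvOuterA nocase l res = res ++ pvSpecF (pvKey nocase) n l := by
  intro n
  induction n with
  | zero =>
    intro l res hl _
    have : l = [] := List.length_eq_zero_iff.mp (Nat.le_zero.mp hl)
    subst this
    simp [pvOuterA, pvSpecF]
  | succ n ih =>
    intro l res hl hinv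
    match l with
    | [] => simp [pvOuterA, pvSpecF]
    | s :: rest =>
      rw [pvOuterA]
      rw [pv_inner_full]
      have hns : s ∉ res := by
        intro hmem
        exact hinv s hmem s (by simp) rfl
      have hcon : res.contains s = false := by
        simpa using hns
      rw [hcon]
      simp only [Bool.false_eq_true, if_false]
      rw [pvSpecF]
      by_cases hany : (rest.any fun t => pvKey nocase s == pvKey nocase t) = true
      · rw [if_pos hany, if_pos hany]
        rw [ih (rest.filter fun t => !(pvKey nocase s == pvKey nocase t)) (res ++ [s])
            (le_trans (List.length_filter_le _ _) (by simpa using hl))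
            ?_]
        · simp
        · intro r hr t ht
          rcases List.mem_filter.mp ht with ⟨htr, hkt⟩
          rcases List.mem_append.mp hr with hr | hr
          · exact hinv r hr t (by simp [htr])
          · have : r = s := by simpa using hr
            subst this
            intro he
            rw [he] at hkt
            simp at hkt
      · rw [if_neg hany, if_neg hany]
        have hfil : (rest.filter fun t => !(pvKey nocase s == pvKey nocase t)) = rest := by
          apply List.filter_eq_self.mpr
          intro t ht
          simp only [Bool.not_eq_eq_eq_not, Bool.not_true]
          by_contra hc
          have : (pvKey nocase s == pvKey nocase t) = true := by
            cases hb : (pvKey nocase s == pvKey nocase t) <;> simp_all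
          exact hany (List.any_eq_true.mpr ⟨t, ht, this⟩)
        rw [hfil]
        rw [ih rest res (by simpa using hl)
            (fun r hr t ht => hinv r hr t (by simp [ht]))]
        simp

-- B-side: one fold step of B's second pass
def pvStep (nocase : Bool) (C : PySem.Dict String Int)
    (st : PySem.Set String × List String) (s : String) : PySem.Set String × List String :=
  if C.getD (pvKey nocase s) 0 > 1 && !(PySem.Set.contains st.1 (pvKey nocase s)) then
    (PySem.Set.add st.1 (pvKey nocase s), st.2 ++ [s])
  else st

-- elements whose key is already seen are skipped, so they may be filtered out up front
theorem pv_skip (nocase : Bool) (C : PySem.Dict String Int) (q : String) :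
    ∀ (l : List String) (seen : PySem.Set String) (res : List String), q ∈ seen →
      l.foldl (pvStep nocase C) (seen, res)
        = (l.filter fun t => !(q == pvKey nocase t)).foldl (pvStep nocase C) (seen, res) := by
  intro l
  induction l with
  | nil => intro seen res _; rfl
  | cons t l ih =>
    intro seen res hq
    by_cases hk : (q == pvKey nocase t) = true
    · have hkey : pvKey nocase t ∈ seen := by
        have : q = pvKey nocase t := by simpa using hk
        rwa [this] at hq
      have hstep : pvStep nocase C (seen, res) t = (seen, res) := by
        unfold pvStep
        simp [pysem, hkey]
      simp only [List.foldl_cons, List.filter_cons, hk, Bool.not_true, hstep]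
      exact ih seen res hq
    · have hkb : (!(q == pvKey nocase t)) = true := by simp_all
      rw [List.filter_cons_of_pos (by exact hkb)]
      simp only [List.foldl_cons]
      by_cases hc : (C.getD (pvKey nocase t) 0 > 1 && !(PySem.Set.contains seen (pvKey nocase t))) = true
      · have h1 : pvStep nocase C (seen, res) t
            = (PySem.Set.add seen (pvKey nocase t), res ++ [t]) := by
          unfold pvStep; rw [if_pos hc]
        rw [h1]
        exact ih _ _ ((PySem.Set.mem_add _ _ _).mpr (Or.inl hq))
      · have h1 : pvStep nocase C (seen, res) t = (seen, res) := by
          unfold pvStep; rw [if_neg hc]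
        rw [h1]
        exact ih _ _ hq

-- map-after-filter on the key, specific to the seen-set filtering step
theorem pv_map_filter (k : String → String) (q : String) :
    ∀ (l : List String),
      (l.filter (fun t => !(q == k t))).map k = (l.map k).filter (fun u => !(q == u)) := by
  intro l
  induction l with
  | nil => rfl
  | cons t l ih =>
    by_cases h : (q == k t) = true
    · simp [h, ih]
    · simp [h, ih]

-- B's second pass computes pvSpecF, provided no key of l is seen yet and the global counts of
-- keys of l are realized inside l itself
theorem pv_bpass (nocase : Bool) (C : PySem.Dict String Int) (lines : List String)
    (hC : ∀ q, C.getD q 0 = (((lines.map (pvKey nocase)).count q : Nat) : Int)) :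
    ∀ (n : Nat) (l : List String), l.length ≤ n → ∀ (seen : PySem.Set String) (res : List String),
      (∀ t ∈ l, pvKey nocase t ∉ seen) →
      (∀ t ∈ l, (lines.map (pvKey nocase)).count (pvKey nocase t)
                = (l.map (pvKey nocase)).count (pvKey nocase t)) →
      (l.foldl (pvStep nocase C) (seen, res)).2 = res ++ pvSpecF (pvKey nocase) n l := by
  intro n
  induction n with
  | zero =>
    intro l hl seen res _ _
    have : l = [] := List.length_eq_zero_iff.mp (Nat.le_zero.mp hl)
    subst this
    simp [pvSpecF]
  | succ n ih =>
    intro l hl seen res h1 h2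
    match l with
    | [] => simp [pvSpecF]
    | s :: rest =>
      have hcount : C.getD (pvKey nocase s) 0
          = (((rest.map (pvKey nocase)).count (pvKey nocase s) + 1 : Nat) : Int) := by
        rw [hC, h2 s (by simp)]
        simp [List.count_cons_self]
      have hns : PySem.Set.contains seen (pvKey nocase s) = false := by
        have := h1 s (by simp)
        simp [pysem]
        simpa using this
      rw [pvSpecF]
      by_cases hany : (rest.any fun t => pvKey nocase s == pvKey nocase t) = true
      · -- duplicated key: emitted now, later occurrences skipped
        have hpos : 0 < (rest.map (pvKey nocase)).count (pvKey nocase s) := by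
          rcases List.any_eq_true.mp hany with ⟨t, ht, hkt⟩
          exact List.count_pos_iff.mpr
            (List.mem_map.mpr ⟨t, ht, (show pvKey nocase s = pvKey nocase t by simpa using hkt).symm⟩)
        have hgt : C.getD (pvKey nocase s) 0 > 1 := by rw [hcount]; omega
        have hstep : pvStep nocase C (seen, res) s
            = (PySem.Set.add seen (pvKey nocase s), res ++ [s]) := by
          have hmem := h1 s (by simp)
          unfold pvStep
          rw [if_pos (by simp [hgt, hmem])]
        rw [List.foldl_cons, hstep,
            pv_skip nocase C (pvKey nocase s) rest _ _
              ((PySem.Set.mem_add _ _ _).mpr (Or.inr rfl))]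
        rw [ih (rest.filter fun t => !(pvKey nocase s == pvKey nocase t))
              (le_trans (List.length_filter_le _ _) (by simpa using hl)) _ _ ?_ ?_]
        · rw [if_pos hany]; simp
        · intro t ht
          rcases List.mem_filter.mp ht with ⟨htr, hkt⟩
          intro hmem
          rcases (PySem.Set.mem_add _ _ _).mp hmem with hmem | hmem
          · exact h1 t (by simp [htr]) hmem
          · rw [hmem] at hkt; simp at hkt
        · intro t ht
          rcases List.mem_filter.mp ht with ⟨htr, hkt⟩
          have hne : ¬(pvKey nocase s == pvKey nocase t) = true := by simpa using hkt
          have hne' : pvKey nocase s ≠ pvKey nocase t := fun he => hne (by simp [he])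
          rw [h2 t (by simp [htr])]
          rw [pv_map_filter]
          rw [List.count_filter (by exact hkt)]
          simp [hne']
      · -- unique key: skipped now and absent later
        have hzero : (rest.map (pvKey nocase)).count (pvKey nocase s) = 0 := by
          by_contra hz
          have : pvKey nocase s ∈ rest.map (pvKey nocase) := List.count_pos_iff.mp (by omega)
          rcases List.mem_map.mp this with ⟨t, ht, hkt⟩
          exact hany (List.any_eq_true.mpr ⟨t, ht, by simp [hkt]⟩)
        have hngt : ¬(C.getD (pvKey nocase s) 0 > 1) := by rw [hcount, hzero]; omega
        have hstep : pvStep nocase C (seen, res) s = (seen, res) := by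
          unfold pvStep
          rw [if_neg (by simp [hngt])]
        have hfil : (rest.filter fun t => !(pvKey nocase s == pvKey nocase t)) = rest := by
          apply List.filter_eq_self.mpr
          intro t ht
          by_contra hc
          have : (pvKey nocase s == pvKey nocase t) = true := by
            cases hb : (pvKey nocase s == pvKey nocase t) <;> simp_all
          exact hany (List.any_eq_true.mpr ⟨t, ht, this⟩)
        rw [List.foldl_cons, hstep, if_neg hany, hfil]
        apply ih rest (by simpa using hl) seen res (fun t ht => h1 t (by simp [ht]))
        intro t ht
        have hne' : pvKey nocase s ≠ pvKey nocase t := by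
          intro he
          exact hany (List.any_eq_true.mpr ⟨t, ht, by simp [he]⟩)
        rw [h2 t (by simp [ht])]
        simp [hne']

-- ===== VERDICT (by name: the statement is the Claim_ definition above) =====
theorem get_dups_spec : Claim_equal_get_dups := by
  intro lines nocase _
  show pvOuterA nocase lines []
      = (lines.foldl
          (pvStep nocase
            (lines.foldl
              (fun d s => d.insert (pvKey nocase s) (d.getD (pvKey nocase s) 0 + 1))
              (PySem.Dict.empty : PySem.Dict String Int)))
          (PySem.Set.empty, [])).2
  have hC : ∀ q,
      (lines.foldl
        (fun d s => d.insert (pvKey nocase s) (d.getD (pvKey nocase s) 0 + 1))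
        (PySem.Dict.empty : PySem.Dict String Int)).getD q 0
      = (((lines.map (pvKey nocase)).count q : Nat) : Int) := by
    intro q
    rw [show (lines.foldl
        (fun d s => d.insert (pvKey nocase s) (d.getD (pvKey nocase s) 0 + 1))
        (PySem.Dict.empty : PySem.Dict String Int))
      = ((lines.map (pvKey nocase)).foldl
        (fun d x => d.insert x (d.getD x 0 + 1))
        (PySem.Dict.empty : PySem.Dict String Int)) from (List.foldl_map (f := pvKey nocase)
        (g := fun (d : PySem.Dict String Int) x => d.insert x (d.getD x 0 + 1))).symm]
    rw [PySem.Dict.getD_foldl_insert_add_one]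
    simp
  rw [pv_bpass nocase _ lines hC lines.length lines le_rfl PySem.Set.empty []
      (by intro t _ h; simp [PySem.Set.empty] at h) (fun t _ => rfl)]
  rw [pv_outer_spec nocase lines.length lines [] le_rfl (by intro r hr; simp at hr)]
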